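-- pv_equiv track=rewrite | github.com/npilon/planterbox | planterbox/__init__.py | normalize_names
-- ===== SOURCE A (Python) =====
-- from collections import defaultdict
--
-- def normalize_names(names):
--     """Normalize a sequence of feature test names.
--
--     Aims to:
--     - Collect together separate entries referring to different scenarios in
--       the same feature.
--     - Order the resulting names in a predictable manner.
--     """
--
--     by_feature = defaultdict(set)
--     for name in sorted(names):
--         name_parts = name.split(':')
--         if len(name_parts) == 3:
--             scenario_indexes = {int(s) for s in name_parts.pop(-1).split(',')}
--             name_parts = tuple(name_parts)
--             if name_parts not in by_feature or by_feature[name_parts]: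
--                 by_feature[name_parts].update(scenario_indexes)
--         elif len(name_parts) == 2:
--             name_parts = tuple(name_parts)
--             scenario_indexes = None
--             by_feature[name_parts] = set()
--         else:
--             continue
--
--     return by_feature
-- ===== SOURCE B (Python) =====
-- from collections import defaultdict
--
-- def normalize_names(names):
--     """Normalize a sequence of feature test names (three separate passes)."""
--     ordered = sorted(names)
--     # pass 1: features named bare (2-part names)
--     bare = set()
--     for name in ordered:
--         parts = name.split(':')
--         if len(parts) == 2:
--             bare.add((parts[0], parts[1]))
--     # pass 2: union of scenario indexes per feature (int() always performed)
--     scenarios = defaultdict(set)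
--     for name in ordered:
--         parts = name.split(':')
--         if len(parts) == 3:
--             indexes = {int(s) for s in parts[2].split(',')}
--             scenarios[(parts[0], parts[1])].update(indexes)
--     # pass 3: assemble, bare features beat their scenario sets
--     result = defaultdict(set)
--     for name in ordered:
--         parts = name.split(':')
--         if len(parts) == 2:
--             result[(parts[0], parts[1])] = set()
--         elif len(parts) == 3:
--             key = (parts[0], parts[1])
--             result[key] = set() if key in bare else scenarios[key]
--     return result
-- ===== Notes on version B (the rewrite author's own statement) =====
-- stated objective: alternative
-- what changed: A's single stateful pass (whose dict update condition entangles 'key unseen' with 'current set empty') is replaced by three independent passes over the sorted names: collect the bare 2-part features into a set, accumulate each feature's union of scenario indexes into a separate map (int() still performed on every 3-part name), then assemble the result dict, with bare features mapped to an empty set.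
import Mathlib
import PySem

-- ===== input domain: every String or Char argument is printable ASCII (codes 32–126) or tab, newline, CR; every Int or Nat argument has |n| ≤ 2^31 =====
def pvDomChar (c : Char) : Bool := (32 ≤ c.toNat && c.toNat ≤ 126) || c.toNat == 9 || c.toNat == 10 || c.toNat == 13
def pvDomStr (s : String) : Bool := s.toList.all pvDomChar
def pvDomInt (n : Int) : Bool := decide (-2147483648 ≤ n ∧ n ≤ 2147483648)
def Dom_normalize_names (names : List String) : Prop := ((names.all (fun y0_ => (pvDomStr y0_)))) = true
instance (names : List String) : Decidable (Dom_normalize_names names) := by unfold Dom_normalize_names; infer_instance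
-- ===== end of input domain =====

-- B replaces A's stateful single pass (whose update condition mixes "seen before" with "currently empty")
-- by three independent passes: bare features, per-feature scenario unions, then assembly. Objective:
-- alternative decomposition, similar cost. Equivalence is about the RETURN value (neither mutates its argument).

-- ===== PORT A =====
-- shared primitive helpers (':' and ',' are non-empty separators, so split? is always `some`;
-- Python's int(s) is ported as (ofStr? s).getD 0 — Pre_ excludes inputs where int() raises ValueError)
def pvSplit (name : String) : List String := (PySem.Str.split? name ":").getD []
def pvKey (parts : List String) : String × String := (parts.getD 0 "", parts.getD 1 "")
def pvIdxSet (s : String) : PySem.Set Int :=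
  PySem.Set.ofList (((PySem.Str.split? s ",").getD []).map (fun t => (PySem.Int.ofStr? t).getD 0))

-- loop body of A's single pass over sorted(names)
def normalize_names_step (d : PySem.Dict (String × String) (List Int)) (name : String) :
    PySem.Dict (String × String) (List Int) :=
  let parts := pvSplit name
  if parts.length = 3 then
    let scenario := pvIdxSet (parts.getD 2 "")
    let key := pvKey parts
    if d.contains key = false ∨ d.getD key [] ≠ [] then
      d.insert key (PySem.Set.update (d.getD key []) scenario)
    else d
  else if parts.length = 2 then d.insert (pvKey parts) []
  else d

def normalize_names (names : List String) : List (String × String × List Int) :=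
  ((PySem.List.sorted names (fun x => x) false).foldl normalize_names_step
      PySem.Dict.empty).items.map (fun p => (p.1.1, p.1.2, p.2))

-- ===== PORT B =====
-- pass 1: features named bare (2-part names)
def pvBareStep (b : PySem.Set (String × String)) (name : String) : PySem.Set (String × String) :=
  let parts := pvSplit name
  if parts.length = 2 then PySem.Set.add b (pvKey parts) else b

def pvAltBare (ordered : List String) : PySem.Set (String × String) :=
  ordered.foldl pvBareStep PySem.Set.empty

-- pass 2: union of scenario indexes per feature (int() performed on every 3-part name)
def pvScenStep (d : PySem.Dict (String × String) (List Int)) (name : String) :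
    PySem.Dict (String × String) (List Int) :=
  let parts := pvSplit name
  if parts.length = 3 then
    let indexes := pvIdxSet (parts.getD 2 "")
    d.insert (pvKey parts) (PySem.Set.update (d.getD (pvKey parts) []) indexes)
  else d

def pvAltScen (ordered : List String) : PySem.Dict (String × String) (List Int) :=
  ordered.foldl pvScenStep PySem.Dict.empty

-- pass 3: assemble, bare features beat their scenario sets
def pvResStep (bare : PySem.Set (String × String))
    (scen : PySem.Dict (String × String) (List Int))
    (d : PySem.Dict (String × String) (List Int)) (name : String) :
    PySem.Dict (String × String) (List Int) :=
  let parts := pvSplit name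
  if parts.length = 2 then d.insert (pvKey parts) []
  else if parts.length = 3 then
    d.insert (pvKey parts)
      (if PySem.Set.contains bare (pvKey parts) then [] else scen.getD (pvKey parts) [])
  else d

def normalize_names_alt (names : List String) : List (String × String × List Int) :=
  let ordered := PySem.List.sorted names (fun x => x) false
  let bare := pvAltBare ordered
  let scen := pvAltScen ordered
  (ordered.foldl (pvResStep bare scen) PySem.Dict.empty).items.map (fun p => (p.1.1, p.1.2, p.2))

-- ===== PRECONDITION & SPEC =====
-- Pre_ excludes exactly the inputs on which Python's int() raises ValueError: a name that splits on ':'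
-- into three parts whose last part has a comma-piece that is not a valid integer literal.
def Pre_normalize_names (names : List String) : Prop :=
  ∀ name ∈ names, (pvSplit name).length = 3 →
    ∀ s ∈ (PySem.Str.split? ((pvSplit name).getD 2 "") ",").getD [],
      (PySem.Int.ofStr? s).isSome = true
instance (names : List String) : Decidable (Pre_normalize_names names) := by
  unfold Pre_normalize_names; infer_instance

def pvWitness_normalize_names : List String :=
  ["web:search:3", "web:login", "web:search:1,2", "api:ping:2"]

def Spec_normalize_names (names : List String) (out : List (String × String × List Int)) : Prop :=
  out = normalize_names_alt names
instance (names : List String) (out : List (String × String × List Int)) :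
    Decidable (Spec_normalize_names names out) := by unfold Spec_normalize_names; infer_instance

-- ===== CLAIM (what is proved, stated in full; the proofs are below) =====
def Claim_equal_normalize_names : Prop :=
  ∀ (names : List String), Dom_normalize_names names → Pre_normalize_names names →
    Spec_normalize_names names (normalize_names names)

-- ===== LEMMAS AND PROOFS =====

-- the key of a name that either version keeps (3-part case checked first, as in A), none otherwise
def pvKeyOf (name : String) : Option (String × String) :=
  if (pvSplit name).length = 3 then some (pvKey (pvSplit name))
  else if (pvSplit name).length = 2 then some (pvKey (pvSplit name))
  else none

-- the keys both dicts hold, in first-occurrence order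
def pvS (L : List String) : List (String × String) := PySem.Set.ofList (L.filterMap pvKeyOf)

-- the common final value of a key: empty if the feature is bare, else its accumulated scenario set
def pvVal (L : List String) (k : String × String) : List Int :=
  if k ∈ pvAltBare L then [] else (pvAltScen L).getD k []

-- assigning a key-determined value, the shape of B's third pass
def pvConstStep (w : (String × String) → List Int)
    (d : PySem.Dict (String × String) (List Int)) (name : String) :
    PySem.Dict (String × String) (List Int) :=
  match pvKeyOf name with
  | some k => d.insert k (w k)
  | none => d

theorem pv_go_ne_nil (sep : List Char) :
    ∀ fuel s cur acc, PySem.Chars.splitOn.go sep fuel s cur acc ≠ [] := by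
  intro fuel
  induction fuel with
  | zero => intro s cur acc; simp [PySem.Chars.splitOn.go]
  | succ n ih =>
    intro s cur acc
    cases s with
    | nil => simp [PySem.Chars.splitOn.go]
    | cons c rest =>
      rw [PySem.Chars.splitOn.go]
      split
      · exact ih _ _ _
      · exact ih _ _ _

theorem pv_add_ne_nil {α : Type} [BEq α] [LawfulBEq α] (s : PySem.Set α) (x : α) :
    PySem.Set.add s x ≠ [] := by
  rw [PySem.Set.add_eq_ite]
  split
  · intro hc; subst hc; simp_all
  · simp

theorem pv_foldl_add_ne_nil {α : Type} [BEq α] [LawfulBEq α] (xs : List α) :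
    ∀ (s : PySem.Set α), s ≠ [] → xs.foldl PySem.Set.add s ≠ [] := by
  induction xs with
  | nil => intro s h; simpa using h
  | cons x t ih => intro s _; exact ih _ (pv_add_ne_nil s x)

theorem pv_ofList_ne_nil {α : Type} [BEq α] [LawfulBEq α] (xs : List α) (h : xs ≠ []) :
    PySem.Set.ofList xs ≠ [] := by
  cases xs with
  | nil => exact absurd rfl h
  | cons x t =>
    rw [PySem.Set.ofList_eq_foldl]
    exact pv_foldl_add_ne_nil t _ (by simp [PySem.Set.add])

theorem pv_update_ne_nil {α : Type} [BEq α] [LawfulBEq α] (s : PySem.Set α) (xs : List α)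
    (h : xs ≠ []) : PySem.Set.update s xs ≠ [] := by
  cases xs with
  | nil => exact absurd rfl h
  | cons x t =>
    show (x :: t).foldl PySem.Set.add s ≠ []
    exact pv_foldl_add_ne_nil t _ (pv_add_ne_nil s x)

theorem pv_idxSet_ne_nil (s : String) : pvIdxSet s ≠ [] := by
  apply pv_ofList_ne_nil
  simp [PySem.Str.split?, PySem.Chars.split?, PySem.Chars.splitOn]
  intro h
  exact pv_go_ne_nil _ _ _ _ _ h

-- membership in B's bare set
theorem pv_mem_bare_aux (L : List String) :
    ∀ (b : PySem.Set (String × String)) (k : String × String),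
      k ∈ L.foldl pvBareStep b ↔
        k ∈ b ∨ ∃ name ∈ L, (pvSplit name).length = 2 ∧ pvKey (pvSplit name) = k := by
  induction L with
  | nil => simp
  | cons x t ih =>
    intro b k
    rw [List.foldl_cons, ih]
    by_cases h : (pvSplit x).length = 2
    · have hstep : pvBareStep b x = PySem.Set.add b (pvKey (pvSplit x)) := by
        simp [pvBareStep, h]
      rw [hstep, PySem.Set.mem_add]
      simp only [List.mem_cons, exists_eq_or_imp, h, true_and]
      constructor
      · rintro ((hb | he) | ht)
        · exact Or.inl hb
        · exact Or.inr (Or.inl he.symm)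
        · exact Or.inr (Or.inr ht)
      · rintro (hb | he | ht)
        · exact Or.inl (Or.inl hb)
        · exact Or.inl (Or.inr he.symm)
        · exact Or.inr ht
    · have hstep : pvBareStep b x = b := by simp [pvBareStep, h]
      rw [hstep]
      simp [h]

theorem pv_mem_bare (L : List String) (k : String × String) :
    k ∈ pvAltBare L ↔ ∃ name ∈ L, (pvSplit name).length = 2 ∧ pvKey (pvSplit name) = k := by
  rw [pvAltBare, pv_mem_bare_aux]
  simp [PySem.Set.empty]

-- keys of B's scenario dict
theorem pv_scen_keys_aux (L : List String) :
    ∀ (d : PySem.Dict (String × String) (List Int)), d.keys.Nodup →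
      (L.foldl pvScenStep d).keys.Nodup ∧
      ∀ k, k ∈ (L.foldl pvScenStep d).keys ↔
        k ∈ d.keys ∨ ∃ name ∈ L, (pvSplit name).length = 3 ∧ pvKey (pvSplit name) = k := by
  induction L with
  | nil => intro d hd; simpa using hd
  | cons x t ih =>
    intro d hd
    rw [List.foldl_cons]
    by_cases h : (pvSplit x).length = 3
    · have hstep : pvScenStep d x
          = d.insert (pvKey (pvSplit x))
              (PySem.Set.update (d.getD (pvKey (pvSplit x)) []) (pvIdxSet ((pvSplit x).getD 2 ""))) := by
        simp [pvScenStep, h]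
      rw [hstep]
      obtain ⟨hn, hm⟩ := ih _ (PySem.Dict.nodup_keys_insert d _ _ hd)
      refine ⟨hn, fun k => ?_⟩
      rw [hm k, PySem.Dict.mem_keys_insert]
      simp only [List.mem_cons, exists_eq_or_imp, h, true_and]
      constructor
      · rintro ((he | hk) | ht)
        · exact Or.inr (Or.inl he.symm)
        · exact Or.inl hk
        · exact Or.inr (Or.inr ht)
      · rintro (hk | he | ht)
        · exact Or.inl (Or.inr hk)
        · exact Or.inl (Or.inl he.symm)
        · exact Or.inr ht
    · have hstep : pvScenStep d x = d := by simp [pvScenStep, h]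
      rw [hstep]
      obtain ⟨hn, hm⟩ := ih _ hd
      refine ⟨hn, fun k => ?_⟩
      rw [hm k]
      simp [h]

theorem pv_mem_scen_keys (L : List String) (k : String × String) :
    k ∈ (pvAltScen L).keys ↔ ∃ name ∈ L, (pvSplit name).length = 3 ∧ pvKey (pvSplit name) = k := by
  have h := (pv_scen_keys_aux L PySem.Dict.empty (by simp)).2 k
  rw [pvAltScen, h]
  simp [PySem.Dict.keys_empty]

-- a feature with some 3-part name has a non-empty accumulated scenario set
theorem pv_scen_getD_ne_nil_aux (L : List String) :
    ∀ (d : PySem.Dict (String × String) (List Int)) (k : String × String),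
      ((∃ name ∈ L, (pvSplit name).length = 3 ∧ pvKey (pvSplit name) = k) ∨ d.getD k [] ≠ []) →
      (L.foldl pvScenStep d).getD k [] ≠ [] := by
  induction L with
  | nil =>
    intro d k h
    simpa using h.resolve_left (by simp)
  | cons x t ih =>
    intro d k h
    rw [List.foldl_cons]
    by_cases h3 : (pvSplit x).length = 3
    · have hstep : pvScenStep d x
          = d.insert (pvKey (pvSplit x))
              (PySem.Set.update (d.getD (pvKey (pvSplit x)) []) (pvIdxSet ((pvSplit x).getD 2 ""))) := by
        simp [pvScenStep, h3]
      rw [hstep]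
      by_cases hk : k = pvKey (pvSplit x)
      · apply ih
        right
        rw [hk, PySem.Dict.getD_insert_self]
        exact pv_update_ne_nil _ _ (pv_idxSet_ne_nil _)
      · apply ih
        rcases h with hex | hd
        · rcases hex with ⟨name, hmem, hlen, hkey⟩
          rcases List.mem_cons.mp hmem with rfl | hmem'
          · exact absurd hkey.symm hk
          · exact Or.inl ⟨name, hmem', hlen, hkey⟩
        · right
          rwa [PySem.Dict.getD_insert, if_neg hk]
    · have hstep : pvScenStep d x = d := by simp [pvScenStep, h3]
      rw [hstep]
      apply ih
      rcases h with hex | hd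
      · rcases hex with ⟨name, hmem, hlen, hkey⟩
        rcases List.mem_cons.mp hmem with rfl | hmem'
        · exact absurd hlen h3
        · exact Or.inl ⟨name, hmem', hlen, hkey⟩
      · exact Or.inr hd

theorem pv_scen_getD_ne_nil (L : List String) (k : String × String)
    (h : ∃ name ∈ L, (pvSplit name).length = 3 ∧ pvKey (pvSplit name) = k) :
    (pvAltScen L).getD k [] ≠ [] := by
  exact pv_scen_getD_ne_nil_aux L PySem.Dict.empty k (Or.inl h)

-- a dict whose items are characterized has those keys, lookups and membership
theorem pv_keys_of_items (d : PySem.Dict (String × String) (List Int))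
    (S : List (String × String)) (w : (String × String) → List Int)
    (h : d.items = S.map (fun k => (k, w k))) : d.keys = S := by
  simp [PySem.Dict.keys, h, List.map_map, Function.comp_def]

theorem pv_contains_of_items (d : PySem.Dict (String × String) (List Int))
    (S : List (String × String)) (w : (String × String) → List Int)
    (h : d.items = S.map (fun k => (k, w k))) (k : String × String) :
    d.contains k = decide (k ∈ S) := by
  rw [PySem.Dict.contains_eq_decide_mem_keys, pv_keys_of_items d S w h]

theorem pv_getD_of_items (d : PySem.Dict (String × String) (List Int))
    (S : List (String × String)) (w : (String × String) → List Int)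
    (h : d.items = S.map (fun k => (k, w k))) (hS : S.Nodup)
    (k : String × String) (hk : k ∈ S) : d.getD k [] = w k := by
  apply PySem.Dict.getD_of_mem_items
  · rw [h]; exact List.mem_map.mpr ⟨k, hk, rfl⟩
  · rw [pv_keys_of_items d S w h]; exact hS

-- the key set grows by one (deduplicated) key per kept name
theorem pv_pvS_append (L : List String) (x : String) (k : String × String)
    (hx : pvKeyOf x = some k) : pvS (L ++ [x]) = PySem.Set.add (pvS L) k := by
  simp [pvS, List.filterMap_append, hx, PySem.Set.ofList_eq_foldl,
    List.foldl_append]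

theorem pv_pvS_append_none (L : List String) (x : String)
    (hx : pvKeyOf x = none) : pvS (L ++ [x]) = pvS L := by
  simp [pvS, List.filterMap_append, hx]

theorem pv_bare_append (L : List String) (x : String) :
    pvAltBare (L ++ [x]) = pvBareStep (pvAltBare L) x := by
  simp [pvAltBare, List.foldl_append]

theorem pv_scen_append (L : List String) (x : String) :
    pvAltScen (L ++ [x]) = pvScenStep (pvAltScen L) x := by
  simp [pvAltScen, List.foldl_append]

-- bare features and scenario-bearing features are among the kept keys
theorem pv_bare_sub (L : List String) (k : String × String) (h : k ∈ pvAltBare L) :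
    k ∈ pvS L := by
  rcases (pv_mem_bare L k).mp h with ⟨name, hmem, hlen, hkey⟩
  have : pvKeyOf name = some k := by
    unfold pvKeyOf
    rw [if_neg (by omega), if_pos hlen, hkey]
  exact (PySem.Set.mem_ofList _ _).mpr (List.mem_filterMap.mpr ⟨name, hmem, this⟩)

theorem pv_scen_sub (L : List String) (k : String × String) (h : k ∈ (pvAltScen L).keys) :
    k ∈ pvS L := by
  rcases (pv_mem_scen_keys L k).mp h with ⟨name, hmem, hlen, hkey⟩
  have : pvKeyOf name = some k := by
    unfold pvKeyOf
    rw [if_pos hlen, hkey]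
  exact (PySem.Set.mem_ofList _ _).mpr (List.mem_filterMap.mpr ⟨name, hmem, this⟩)

-- a kept key that is not bare carries a 3-part name
theorem pv_mem_S_not_bare (L : List String) (k : String × String)
    (hmem : k ∈ pvS L) (hnb : k ∉ pvAltBare L) :
    ∃ name ∈ L, (pvSplit name).length = 3 ∧ pvKey (pvSplit name) = k := by
  rcases List.mem_filterMap.mp ((PySem.Set.mem_ofList _ _).mp hmem) with ⟨name, hin, hko⟩
  unfold pvKeyOf at hko
  by_cases h3 : (pvSplit name).length = 3
  · rw [if_pos h3] at hko
    exact ⟨name, hin, h3, Option.some_injective _ hko⟩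
  · rw [if_neg h3] at hko
    by_cases h2 : (pvSplit name).length = 2
    · rw [if_pos h2] at hko
      exact absurd ((pv_mem_bare L k).mpr ⟨name, hin, h2, Option.some_injective _ hko⟩) hnb
    · rw [if_neg h2] at hko
      exact absurd hko (by simp)

-- characterization of A's dict after the whole pass
theorem pv_A_items (L : List String) :
    (L.foldl normalize_names_step PySem.Dict.empty).items
      = (pvS L).map (fun k => (k, pvVal L k)) := by
  induction L using List.reverseRecOn with
  | nil => simp [pvS, PySem.Dict.empty, PySem.Set.ofList_eq_foldl]
  | append_singleton L x ih =>
    rw [List.foldl_append, List.foldl_cons, List.foldl_nil]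
    set d := L.foldl normalize_names_step PySem.Dict.empty with hd
    have hSnd : (pvS L).Nodup := PySem.Set.nodup_ofList _
    by_cases h3 : (pvSplit x).length = 3
    · -- 3-part name
      have h2 : ¬ (pvSplit x).length = 2 := by omega
      set k := pvKey (pvSplit x) with hkdef
      set I := pvIdxSet ((pvSplit x).getD 2 "") with hIdef
      have hko : pvKeyOf x = some k := by unfold pvKeyOf; rw [if_pos h3]
      have hS : pvS (L ++ [x]) = PySem.Set.add (pvS L) k := pv_pvS_append L x k hko
      have hbare : pvAltBare (L ++ [x]) = pvAltBare L := by
        rw [pv_bare_append]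
        simp only [pvBareStep]
        rw [if_neg h2]
      have hscen : pvAltScen (L ++ [x])
          = (pvAltScen L).insert k (PySem.Set.update ((pvAltScen L).getD k []) I) := by
        rw [pv_scen_append]
        simp only [pvScenStep]
        rw [if_pos h3]
      have hvala : ∀ a, a ≠ k → pvVal (L ++ [x]) a = pvVal L a := by
        intro a ha
        unfold pvVal
        rw [hbare, hscen, PySem.Dict.getD_insert, if_neg ha]
      by_cases hmem : k ∈ pvS L
      · have hcont : d.contains k = true := by
          rw [pv_contains_of_items d _ _ ih]; simp [hmem]
        have hgd : d.getD k [] = pvVal L k := pv_getD_of_items d _ _ ih hSnd k hmem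
        rw [hS, PySem.Set.add_of_mem hmem]
        by_cases hv : pvVal L k = []
        · -- A skips; the key must be bare, so the canonical value is unchanged
          have hkb : k ∈ pvAltBare L := by
            by_contra hnb
            exact absurd hv (by
              have := pv_scen_getD_ne_nil L k (pv_mem_S_not_bare L k hmem hnb)
              unfold pvVal at hv ⊢
              rw [if_neg hnb] at hv
              exact absurd hv this)
          have hcond : ¬ (d.contains k = false ∨ d.getD k [] ≠ []) := by
            simp [hcont, hgd, hv]
          have hstep : normalize_names_step d x = d := by
            simp only [normalize_names_step]
            rw [if_pos h3, if_neg hcond]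
          rw [hstep, ih]
          apply List.map_congr_left
          intro a ha
          by_cases hak : a = k
          · subst hak
            have hvk : pvVal (L ++ [x]) k = [] := by
              unfold pvVal
              rw [hbare, if_pos hkb]
            rw [hvk, hv]
          · rw [hvala a hak]
        · -- A updates in place
          have hknb : k ∉ pvAltBare L := by
            intro hc
            exact hv (by unfold pvVal; rw [if_pos hc])
          have hgs : pvVal L k = (pvAltScen L).getD k [] := by
            unfold pvVal; rw [if_neg hknb]
          have hcond : d.contains k = false ∨ d.getD k [] ≠ [] := by
            rw [hgd]; exact Or.inr hv
          have hstep : normalize_names_step d x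
              = d.insert k (PySem.Set.update (pvVal L k) I) := by
            simp only [normalize_names_step]
            rw [if_pos h3, if_pos hcond, hgd]
          rw [hstep, PySem.Dict.items_insert_of_contains d _ hcont, ih, List.map_map]
          apply List.map_congr_left
          intro a ha
          by_cases hak : a = k
          · subst hak
            have hvk : pvVal (L ++ [x]) k = PySem.Set.update (pvVal L k) I := by
              unfold pvVal
              rw [hbare, if_neg hknb, hscen, PySem.Dict.getD_insert_self, ← hgs,
                if_neg hknb]
            simp [hvk]
          · have hne : ((a, pvVal L a).1 == k) = false := by
              simp [hak]
            simp only [Function.comp_apply, hne, Bool.false_eq_true, if_false]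
            rw [hvala a hak]
      · -- fresh key: A appends it with its scenario set
        have hcont : d.contains k = false := by
          rw [pv_contains_of_items d _ _ ih]; simp [hmem]
        have hgd : d.getD k [] = [] := PySem.Dict.getD_of_not_contains d [] hcont
        have hcond : d.contains k = false ∨ d.getD k [] ≠ [] := Or.inl hcont
        have hstep : normalize_names_step d x = d.insert k (PySem.Set.update [] I) := by
          simp only [normalize_names_step]
          rw [if_pos h3, if_pos hcond, hgd]
        have hknb : k ∉ pvAltBare L := fun hc => hmem (pv_bare_sub L k hc)
        have hks : k ∉ (pvAltScen L).keys := fun hc => hmem (pv_scen_sub L k hc)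
        have hgs : (pvAltScen L).getD k [] = [] := by
          apply PySem.Dict.getD_of_not_contains
          rw [← Bool.not_eq_true]
          intro hc
          exact hks ((PySem.Dict.contains_iff_mem_keys _ _).mp hc)
        rw [hstep, PySem.Dict.items_insert_of_not_contains d _ hcont, ih, hS,
          PySem.Set.add_of_not_mem hmem, List.map_append]
        congr 1
        · apply List.map_congr_left
          intro a ha
          rw [hvala a (fun hc => hmem (hc ▸ ha))]
        · have : pvVal (L ++ [x]) k = PySem.Set.update [] I := by
            unfold pvVal
            rw [hbare, if_neg hknb, hscen, PySem.Dict.getD_insert_self, hgs]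
          simp [this]
    · by_cases h2 : (pvSplit x).length = 2
      · -- 2-part name: the feature becomes bare
        set k := pvKey (pvSplit x) with hkdef
        have hko : pvKeyOf x = some k := by unfold pvKeyOf; rw [if_neg h3, if_pos h2]
        have hS : pvS (L ++ [x]) = PySem.Set.add (pvS L) k := pv_pvS_append L x k hko
        have hbare : pvAltBare (L ++ [x]) = PySem.Set.add (pvAltBare L) k := by
          rw [pv_bare_append]
          simp only [pvBareStep]
          rw [if_pos h2]
        have hscen : pvAltScen (L ++ [x]) = pvAltScen L := by
          rw [pv_scen_append]
          simp only [pvScenStep]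
          rw [if_neg h3]
        have hstep : normalize_names_step d x = d.insert k [] := by
          simp only [normalize_names_step]
          rw [if_neg h3, if_pos h2]
        have hvala : ∀ a, a ≠ k → pvVal (L ++ [x]) a = pvVal L a := by
          intro a ha
          unfold pvVal
          rw [hbare, hscen]
          by_cases hab : a ∈ pvAltBare L
          · rw [if_pos ((PySem.Set.mem_add _ _ _).mpr (Or.inl hab)), if_pos hab]
          · rw [if_neg (fun hc => ((PySem.Set.mem_add _ _ _).mp hc).elim hab ha), if_neg hab]
        have hvalk : pvVal (L ++ [x]) k = [] := by
          unfold pvVal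
          rw [hbare, if_pos ((PySem.Set.mem_add _ _ _).mpr (Or.inr rfl))]
        rw [hstep]
        by_cases hmem : k ∈ pvS L
        · have hcont : d.contains k = true := by
            rw [pv_contains_of_items d _ _ ih]; simp [hmem]
          rw [PySem.Dict.items_insert_of_contains d _ hcont, ih, hS,
            PySem.Set.add_of_mem hmem, List.map_map]
          apply List.map_congr_left
          intro a ha
          by_cases hak : a = k
          · subst hak; simp [hvalk]
          · have hne : ((a, pvVal L a).1 == k) = false := by simp [hak]
            simp only [Function.comp_apply, hne, Bool.false_eq_true, if_false]
            rw [hvala a hak]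
        · have hcont : d.contains k = false := by
            rw [pv_contains_of_items d _ _ ih]; simp [hmem]
          rw [PySem.Dict.items_insert_of_not_contains d _ hcont, ih, hS,
            PySem.Set.add_of_not_mem hmem, List.map_append]
          congr 1
          · apply List.map_congr_left
            intro a ha
            rw [hvala a (fun hc => hmem (hc ▸ ha))]
          · simp [hvalk]
      · -- irrelevant name: nothing changes
        have hko : pvKeyOf x = none := by unfold pvKeyOf; rw [if_neg h3, if_neg h2]
        have hstep : normalize_names_step d x = d := by
          simp only [normalize_names_step]
          rw [if_neg h3, if_neg h2]
        have hbare : pvAltBare (L ++ [x]) = pvAltBare L := by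
          rw [pv_bare_append]
          simp only [pvBareStep]
          rw [if_neg h2]
        have hscen : pvAltScen (L ++ [x]) = pvAltScen L := by
          rw [pv_scen_append]
          simp only [pvScenStep]
          rw [if_neg h3]
        rw [hstep, pv_pvS_append_none L x hko, ih]
        apply List.map_congr_left
        intro a ha
        unfold pvVal
        rw [hbare, hscen]

-- characterization of a constant-assignment pass (the shape of B's third loop)
theorem pv_const_items (w : (String × String) → List Int) (L : List String) :
    (L.foldl (pvConstStep w) PySem.Dict.empty).items = (pvS L).map (fun k => (k, w k)) := by
  induction L using List.reverseRecOn with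
  | nil => simp [pvS, PySem.Dict.empty, PySem.Set.ofList_eq_foldl]
  | append_singleton L x ih =>
    rw [List.foldl_append, List.foldl_cons, List.foldl_nil]
    set d := L.foldl (pvConstStep w) PySem.Dict.empty with hd
    cases hko : pvKeyOf x with
    | none =>
      rw [pv_pvS_append_none L x hko, ← ih]
      unfold pvConstStep
      rw [hko]
    | some k =>
      have hstep : pvConstStep w d x = d.insert k (w k) := by
        unfold pvConstStep; rw [hko]
      rw [hstep, pv_pvS_append L x k hko]
      by_cases hmem : k ∈ pvS L
      · have hcont : d.contains k = true := by
          rw [pv_contains_of_items d _ _ ih]; simp [hmem]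
        rw [PySem.Dict.items_insert_of_contains d _ hcont, ih,
          PySem.Set.add_of_mem hmem, List.map_map]
        apply List.map_congr_left
        intro a ha
        by_cases hak : a = k
        · subst hak; simp
        · have hne : ((a, w a).1 == k) = false := by simp [hak]
          simp only [Function.comp_apply, hne, Bool.false_eq_true, if_false]
      · have hcont : d.contains k = false := by
          rw [pv_contains_of_items d _ _ ih]; simp [hmem]
        rw [PySem.Dict.items_insert_of_not_contains d _ hcont, ih,
          PySem.Set.add_of_not_mem hmem, List.map_append]
        simp

-- B's third loop is a constant-assignment pass for pvVal
theorem pv_res_eq_const (L : List String) :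
    L.foldl (pvResStep (pvAltBare L) (pvAltScen L)) PySem.Dict.empty
      = L.foldl (pvConstStep (pvVal L)) PySem.Dict.empty := by
  apply PySem.List.foldl_congr_mem
  intro d name hmem
  by_cases h2 : (pvSplit name).length = 2
  · have h3 : ¬ (pvSplit name).length = 3 := by omega
    have hkb : pvKey (pvSplit name) ∈ pvAltBare L :=
      (pv_mem_bare L _).mpr ⟨name, hmem, h2, rfl⟩
    have hval : pvVal L (pvKey (pvSplit name)) = [] := by
      unfold pvVal; rw [if_pos hkb]
    unfold pvResStep pvConstStep pvKeyOf
    rw [if_neg h3, if_pos h2]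
    simp only [h2, if_true, hval]
  · by_cases h3 : (pvSplit name).length = 3
    · have hval : (if PySem.Set.contains (pvAltBare L) (pvKey (pvSplit name)) then []
          else (pvAltScen L).getD (pvKey (pvSplit name)) []) = pvVal L (pvKey (pvSplit name)) := by
        unfold pvVal
        rw [PySem.Set.contains_eq_decide]
        by_cases hb : pvKey (pvSplit name) ∈ pvAltBare L <;> simp [hb]
      unfold pvResStep pvConstStep pvKeyOf
      rw [if_pos h3]
      simp only [h3, if_true, hval]
      rw [if_neg (by omega : ¬ (3 : Nat) = 2)]
    · unfold pvResStep pvConstStep pvKeyOf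
      rw [if_neg h3, if_neg h2]
      simp only [h2, h3, if_false]

-- ===== VERDICT (by name: the statement is the Claim_ definition above) =====
theorem normalize_names_spec : Claim_equal_normalize_names := by
  intro names _ _
  show normalize_names names = normalize_names_alt names
  unfold normalize_names normalize_names_alt
  simp only [pv_res_eq_const, pv_const_items, pv_A_items]
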